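-- pv_equiv track=rewrite | github.com/SherlockHowl/KLA | Milestone3/Milestone3.py | Binning
-- ===== SOURCE A (Python) =====
-- def Binning(data, rules):
--     if(len(data[0]) < 5):
--         data[0].append('Bincode')
--     dataSize = len(data) - 1
--     for row in rules:
--         row = row.split(',')
--         if(len(row) < 2):
--             continue
--         BinID = row[0]
--         rule = row[1].split()
--         size = len(rule)
--         size = int((size+1)/4)
--         variable = []
--         cond = []
--         thresh = []
--         count = 0
--         shift = 0
--         while(count<size):
--             variable.append(rule[shift+0])
--             cond.append(rule[shift+1])
--             thresh.append(int(rule[shift+2]))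
--             count = count + 1
--             shift = shift + 4
--         for index in range(dataSize):
--             flag = True
--             for ruleIndex in range(len(cond)):
--                 if(cond[ruleIndex]) == '<':
--                     flag = flag and (int(data[index+1][3]) < thresh[ruleIndex])
--                 elif(cond[ruleIndex]) == '>':
--                     flag = flag and (int(data[index+1][3]) > thresh[ruleIndex])
--             if flag:
--                 if(len(data[index+1]) < 5):
--                     data[index+1].append(BinID)
--                 else:
--                     data[index+1][4] = BinID
--     return data, dataSize
-- ===== SOURCE B (Python) =====
-- # Compile each rule once into a numeric interval (lo, hi), then assign to every row
-- # the last rule whose interval contains the row's value, in one pass with a 'best'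
-- # accumulator (an unconstrained rule matches every row without reading the value).
-- def Binning(data, rules):
--     if len(data[0]) < 5:
--         data[0].append('Bincode')
--     intervals = []
--     for line in rules:
--         parts = line.split(',')
--         if len(parts) < 2:
--             continue
--         toks = parts[1].split()
--         lo = None
--         hi = None
--         for i in range(2, len(toks), 4):
--             op = toks[i - 1]
--             t = int(toks[i])
--             if op == '<':
--                 hi = t if hi is None else min(hi, t)
--             elif op == '>':
--                 lo = t if lo is None else max(lo, t)
--         intervals.append((parts[0], lo, hi))
--     for row in data[1:]:
--         best = None
--         for binid, lo, hi in intervals: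
--             if lo is None and hi is None:
--                 best = binid
--             else:
--                 v = int(row[3])
--                 if (lo is None or v > lo) and (hi is None or v < hi):
--                     best = binid
--         if best is not None:
--             if len(row) < 5:
--                 row.append(best)
--             else:
--                 row[4] = best
--     return data, len(data) - 1
-- ===== Notes on version B (the rewrite author's own statement) =====
-- stated objective: alternative
-- what changed: A runs rule-major nested loops, rebuilding per-rule cond/thresh lists and mutating matching rows once per rule; B compiles each rule once into a numeric interval (lo,hi) by walking the threshold positions range(2,len,4), then makes a single row-major pass keeping a 'best' accumulator and writes at most one bin code per row.
-- intended difference: On data rows with fewer than 4 columns when at least two rules are well-formed (contain a comma) — within the precondition such a short row forces every rule to be comparison-free, so every well-formed rule matches every row — A appends one bin code per matching rule before it starts overwriting column 4 (['x'] -> ['x','1','2']), smearing bin codes over arbitrary columns; B returns the row with the single last matching bin code (['x','2']), which is the intended one-bin-code-per-row behaviour. — e.g. on Binning([["h"], ["x"]], ["1,", "2,"]): A returns ([["h", "Bincode"], ["x", "1", "2"]], 1), B returns ([["h", "Bincode"], ["x", "2"]], 1)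
import Mathlib
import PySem

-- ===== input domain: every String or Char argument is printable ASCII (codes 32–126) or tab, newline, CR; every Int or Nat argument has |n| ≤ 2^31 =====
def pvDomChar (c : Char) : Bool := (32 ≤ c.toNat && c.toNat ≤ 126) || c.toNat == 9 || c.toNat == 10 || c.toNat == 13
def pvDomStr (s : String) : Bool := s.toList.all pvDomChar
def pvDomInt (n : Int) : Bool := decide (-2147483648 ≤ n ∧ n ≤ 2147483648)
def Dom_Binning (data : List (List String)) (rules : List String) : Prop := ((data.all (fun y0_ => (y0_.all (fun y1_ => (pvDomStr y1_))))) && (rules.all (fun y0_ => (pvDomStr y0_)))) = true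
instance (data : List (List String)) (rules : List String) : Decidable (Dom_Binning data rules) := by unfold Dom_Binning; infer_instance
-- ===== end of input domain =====

-- B replaces A's rule-major nested loops (which rebuild cond/thresh lists per rule and mutate
-- every matching row once per rule) by compiling each rule once into a numeric interval and one
-- row-major pass with a 'best' accumulator that writes at most one bin code per row.  Both
-- programs mutate `data` in place; the theorems are about the returned value.

-- ===== PORT A =====
-- while(count<size): variable/cond/thresh appends; none = IndexError/ValueError (outside Pre_)
def pvA_while (rule : List String) : Nat → Int → List String → List String → List Int →
    Option (List String × List String × List Int)
  | 0, _, var, cond, thresh => some (var, cond, thresh)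
  | n+1, shift, var, cond, thresh =>
    match PySem.List.pyGet? rule (shift+0), PySem.List.pyGet? rule (shift+1),
          PySem.List.pyGet? rule (shift+2) with
    | some a, some b, some c =>
      match PySem.Int.ofStr? c with
      | some t => pvA_while rule n (shift+4) (var ++ [a]) (cond ++ [b]) (thresh ++ [t])
      | none => none
    | _, _, _ => none

-- for ruleIndex in range(len(cond)): flag = flag and (...); int(data[index+1][3]) is evaluated
-- lazily (v? is only matched where Python evaluates it); none = the int() there raises
def pvA_flag (v? : Option Int) : List String → List Int → Bool → Option Bool
  | [], _, flag => some flag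
  | _ :: _, [], _ => none   -- thresh[ruleIndex] IndexError (unreachable: lists built in lockstep)
  | c :: cs, t :: ts, flag =>
    if c = "<" then
      (if flag then
        match v? with
        | none => none
        | some v => pvA_flag v? cs ts (decide (v < t))
      else pvA_flag v? cs ts false)
    else if c = ">" then
      (if flag then
        match v? with
        | none => none
        | some v => pvA_flag v? cs ts (decide (t < v))
      else pvA_flag v? cs ts false)
    else pvA_flag v? cs ts flag

-- for index in range(dataSize): flag test, then append/assign at column 4 (List.set is exact:
-- the assigned index is nonneg and in range there)
def pvA_rows (binID : String) (cond : List String) (thresh : List Int) :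
    List Int → List (List String) → Option (List (List String))
  | [], data => some data
  | index :: rest, data =>
    let v? := (PySem.List.pyGet? data (index+1)).bind
                (fun r => (PySem.List.pyGet? r 3).bind PySem.Int.ofStr?)
    match pvA_flag v? cond thresh true with
    | none => none
    | some flag =>
      if flag then
        match PySem.List.pyGet? data (index+1) with
        | none => none
        | some row =>
          let row' := if row.length < 5 then row ++ [binID] else row.set 4 binID
          pvA_rows binID cond thresh rest (PySem.List.pySetD data (index+1) row')
      else pvA_rows binID cond thresh rest data

def pvA_ruleLoop (dataSize : Int) : List String → List (List String) → Option (List (List String))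
  | [], data => some data
  | r :: rs, data =>
    let parts := (PySem.Str.split? r ",").getD []
    if parts.length < 2 then pvA_ruleLoop dataSize rs data
    else
      let binID := (PySem.List.pyGet? parts 0).getD ""
      let rule := PySem.Str.split₀ ((PySem.List.pyGet? parts 1).getD "")
      -- size = int((size+1)/4): exact integer floor for these list lengths
      let size := PySem.Int.floordiv ((rule.length : Int) + 1) 4
      match pvA_while rule size.toNat 0 [] [] [] with
      | none => none
      | some (_, cond, thresh) =>
        match pvA_rows binID cond thresh (PySem.List.pyRange 0 dataSize 1) data with
        | none => none
        | some data' => pvA_ruleLoop dataSize rs data'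

def Binning (data : List (List String)) (rules : List String) : List (List String) × Int :=
  match PySem.List.pyGet? data 0 with
  | none => ([], 0)   -- data[0] raises IndexError on empty data (outside Pre_)
  | some d0 =>
    let data1 := if d0.length < 5 then PySem.List.pySetD data 0 (d0 ++ ["Bincode"]) else data
    let dataSize : Int := (data1.length : Int) - 1
    match pvA_ruleLoop dataSize rules data1 with
    | none => ([], 0)   -- an exception propagates (outside Pre_)
    | some data2 => (data2, dataSize)

-- ===== PORT B =====
-- for i in range(2, len(toks), 4): op = toks[i-1]; t = int(toks[i]); tighten (lo, hi)
def pvB_bounds (toks : List String) : List Int → Option Int × Option Int →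
    Option (Option Int × Option Int)
  | [], s => some s
  | i :: rest, (lo, hi) =>
    match PySem.List.pyGet? toks (i - 1) with
    | none => none
    | some op =>
      match (PySem.List.pyGet? toks i).bind PySem.Int.ofStr? with
      | none => none   -- int(toks[i]) raises (outside Pre_)
      | some t =>
        if op = "<" then
          pvB_bounds toks rest (lo, some (match hi with | none => t | some h => min h t))
        else if op = ">" then
          pvB_bounds toks rest (some (match lo with | none => t | some l => max l t), hi)
        else pvB_bounds toks rest (lo, hi)

def pvB_compile : List String → Option (List (String × Option Int × Option Int))
  | [] => some []
  | line :: rs =>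
    let parts := (PySem.Str.split? line ",").getD []
    if parts.length < 2 then pvB_compile rs
    else
      let toks := PySem.Str.split₀ (parts.getD 1 "")
      match pvB_bounds toks (PySem.List.pyRange 2 (toks.length : Int) 4) (none, none) with
      | none => none
      | some lohi => (pvB_compile rs).map (fun l => (parts.getD 0 "", lohi) :: l)

-- for binid, lo, hi in intervals: keep the last match in 'best'; an unconstrained interval
-- matches without reading the value, otherwise v = int(row[3]) (none = it raises)
def pvB_pick (row : List String) : List (String × Option Int × Option Int) →
    Option String → Option (Option String)
  | [], best => some best
  | (binid, lo, hi) :: rest, best =>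
    if lo = none ∧ hi = none then pvB_pick row rest (some binid)
    else
      match (PySem.List.pyGet? row 3).bind PySem.Int.ofStr? with
      | none => none
      | some v =>
        if (match lo with | none => true | some l => decide (l < v)) &&
           (match hi with | none => true | some h => decide (v < h)) then
          pvB_pick row rest (some binid)
        else pvB_pick row rest best

def pvB_assign (ivs : List (String × Option Int × Option Int)) (row : List String) :
    Option (List String) :=
  match pvB_pick row ivs none with
  | none => none
  | some none => some row
  | some (some b) => some (if row.length < 5 then row ++ [b] else row.set 4 b)

def Binning_alt (data : List (List String)) (rules : List String) : List (List String) × Int :=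
  match data with
  | [] => ([], 0)   -- data[0] raises IndexError on empty data (outside Pre_)
  | d0 :: rest =>
    let d0' := if d0.length < 5 then d0 ++ ["Bincode"] else d0
    match pvB_compile rules with
    | none => ([], 0)
    | some ivs =>
      match rest.mapM (pvB_assign ivs) with
      | none => ([], 0)
      | some rows => (d0' :: rows, ((d0 :: rest).length : Int) - 1)

-- ===== PRECONDITION & SPEC =====
-- static rule anatomy (pure input inspection used by Pre_ and D_)
def pvParts (r : String) : List String :=
  match PySem.Str.splitMax? r "," (-1) with
  | some l => l
  | none => []
def pvToks (r : String) : List String := PySem.Str.split₀ ((pvParts r).getD 1 "")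
def pvNP (r : String) : Nat := ((pvToks r).length + 1) / 4
def pvPairs (r : String) : List (String × String) :=
  (List.range (pvNP r)).map (fun j => ((pvToks r).getD (4*j+1) "", (pvToks r).getD (4*j+2) ""))
def pvValid (r : String) : Bool := decide (2 ≤ (pvParts r).length)
def pvRuleOK (r : String) : Bool :=
  !(pvValid r) || (pvPairs r).all (fun p => (PySem.Int.ofStr? p.2).isSome)
def pvConstr (r : String) : Bool :=
  pvValid r && (pvPairs r).any (fun p => p.1 = "<" || p.1 = ">")

-- Pre_ = exactly the inputs where A returns normally: data nonempty (else IndexError on data[0]),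
-- every threshold token of every valid rule parses as an int (else ValueError), and — if some rule
-- actually compares (has a '<' or '>' condition) — every data row has a parseable 4th column
-- (else IndexError/ValueError on int(data[index+1][3])).
def Pre_Binning (data : List (List String)) (rules : List String) : Prop :=
  data ≠ [] ∧ (∀ r ∈ rules, pvRuleOK r = true) ∧
  ((∃ r ∈ rules, pvConstr r = true) →
    ∀ row ∈ data.tail, 3 < row.length ∧ (PySem.Int.ofStr? (row.getD 3 "")).isSome = true)
instance (data : List (List String)) (rules : List String) : Decidable (Pre_Binning data rules) := by
  unfold Pre_Binning; infer_instance

def pvWitness_Binning : List (List String) × List String :=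
  ([["a","b","c","d"], ["p","q","r","7"], ["p","q","r","2","old"]],
   ["B1,v > 3 and", "B2,v < 5 and v > 0"])

-- On data rows with fewer than 4 columns when at least two rules are well-formed (contain a
-- comma) — within Pre_ a short row forces every rule to be comparison-free, so every such rule
-- matches every row — A pads the short row with one bin code per matching rule before it starts
-- overwriting column 4 (e.g. ['x'] -> ['x','1','2']), smearing bin codes over arbitrary columns;
-- B returns the intended value, the row with the single last matching bin code.
def D_Binning (data : List (List String)) (rules : List String) : Prop :=
  2 ≤ rules.countP (fun r => r.toList.contains ',') ∧ ∃ row ∈ data.tail, row.length < 4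
instance (data : List (List String)) (rules : List String) : Decidable (D_Binning data rules) := by
  unfold D_Binning; infer_instance

def Spec_Binning (data : List (List String)) (rules : List String)
    (out : List (List String) × Int) : Prop :=
  ¬ D_Binning data rules → out = Binning_alt data rules
instance (data : List (List String)) (rules : List String) (out : List (List String) × Int) :
    Decidable (Spec_Binning data rules out) := by unfold Spec_Binning; infer_instance

def pvDiffWitness_Binning : List (List String) × List String := ([["h"], ["x"]], ["1,", "2,"])
def pvDiffWitnessOut_Binning : (List (List String) × Int) × (List (List String) × Int) :=
  (([["h", "Bincode"], ["x", "1", "2"]], 1), ([["h", "Bincode"], ["x", "2"]], 1))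

-- ===== CLAIM (what is proved, stated in full; the proofs are below) =====
def Claim_unchanged_Binning : Prop := ∀ (data : List (List String)) (rules : List String),
  Dom_Binning data rules → Pre_Binning data rules → Spec_Binning data rules (Binning data rules)
def Claim_changed_Binning : Prop :=
  Dom_Binning (pvDiffWitness_Binning.1) (pvDiffWitness_Binning.2) ∧
  Pre_Binning (pvDiffWitness_Binning.1) (pvDiffWitness_Binning.2) ∧
  D_Binning (pvDiffWitness_Binning.1) (pvDiffWitness_Binning.2) ∧
  Binning (pvDiffWitness_Binning.1) (pvDiffWitness_Binning.2) = pvDiffWitnessOut_Binning.1 ∧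
  Binning_alt (pvDiffWitness_Binning.1) (pvDiffWitness_Binning.2) = pvDiffWitnessOut_Binning.2 ∧
  pvDiffWitnessOut_Binning.1 ≠ pvDiffWitnessOut_Binning.2
def Claim_exact_Binning : Prop := ∀ (data : List (List String)) (rules : List String),
  Dom_Binning data rules → Pre_Binning data rules → D_Binning data rules →
  Binning data rules ≠ Binning_alt data rules

-- ===== LEMMAS AND PROOFS =====
theorem pvParts_eq (r : String) : pvParts r = (PySem.Str.split? r ",").getD [] := by
  rw [pvParts]
  have h : PySem.Str.splitMax? r "," (-1) = PySem.Str.split? r "," := by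
    simp [PySem.Str.splitMax?, PySem.Str.split?,
      PySem.Chars.splitMax?_of_neg _ _ (by norm_num : (-1:Int) < 0)]
  rw [h]
  rcases PySem.Str.split? r "," with _ | l <;> rfl

-- D_'s comma count agrees with the ports' split: |splitOn s ','| = 1 + count ','
theorem pvGoLen : ∀ (fuel : Nat) (l cur : List Char) (acc : List (List Char)),
    l.length ≤ fuel →
    (PySem.Chars.splitOn.go [','] fuel l cur acc).length = acc.length + 1 + l.count ',' := by
  intro fuel
  induction fuel with
  | zero =>
    intro l cur acc h
    have hl : l = [] := by cases l with | nil => rfl | cons a t => simp at h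
    subst hl
    simp [PySem.Chars.splitOn.go]
  | succ n ih =>
    intro l cur acc h
    cases l with
    | nil => simp [PySem.Chars.splitOn.go]
    | cons c rest =>
      rw [PySem.Chars.splitOn.go]
      by_cases hc : c = ','
      · subst hc
        rw [if_pos (by simp [List.isPrefixOf])]
        rw [show List.drop ([','] : List Char).length (',' :: rest) = rest from rfl]
        rw [ih rest [] (cur.reverse :: acc) (by simpa using h)]
        simp [List.count_cons]; omega
      · rw [if_neg (by simp [List.isPrefixOf]; exact fun hx => hc hx.symm)]
        rw [ih rest (c :: cur) acc (by simpa using h)]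
        simp [List.count_cons, hc]

theorem pvSplitLen (s : List Char) :
    (PySem.Chars.splitOn s [',']).length = 1 + s.count ',' := by
  rw [PySem.Chars.splitOn, pvGoLen (s.length + 1) s [] [] (by omega)]
  simp

theorem pvParts_len (r : String) : (pvParts r).length = 1 + r.toList.count ',' := by
  rw [pvParts_eq]
  rw [show PySem.Str.split? r "," = some ((PySem.Chars.splitOn r.toList [',']).map String.ofList)
    from by rw [PySem.Str.split?, show (",".toList) = [','] from rfl, PySem.Chars.split?]; rfl]
  simp [pvSplitLen]

theorem pvValid_contains (r : String) : pvValid r = r.toList.contains ',' := by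
  rw [pvValid]
  by_cases hm : ',' ∈ r.toList
  · have h1 : 0 < r.toList.count ',' := List.count_pos_iff.mpr hm
    have h2 : 2 ≤ (pvParts r).length := by rw [pvParts_len]; omega
    simp [h2, hm]
  · have h1 : r.toList.count ',' = 0 := List.count_eq_zero.mpr hm
    have h2 : ¬ (2 ≤ (pvParts r).length) := by rw [pvParts_len, h1]; omega
    simp [h2, hm]

theorem pvCount_eq (rules : List String) :
    rules.countP pvValid = rules.countP (fun r => r.toList.contains ',') :=
  List.countP_congr (fun r _ => by rw [pvValid_contains])

-- proof-side abstractions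
def pvIupd (s : Option Int × Option Int × Bool) (p : String × Int) :
    Option Int × Option Int × Bool :=
  if p.1 = "<" then (s.1, some (match s.2.1 with | none => p.2 | some h => min h p.2), true)
  else if p.1 = ">" then (some (match s.1 with | none => p.2 | some l => max l p.2), s.2.1, true)
  else s
def pvIPairs (r : String) : List (String × Int) :=
  (pvPairs r).map (fun p => (p.1, (PySem.Int.ofStr? p.2).getD 0))
def pvCompiled : List String → List (String × Option Int × Option Int × Bool)
  | [] => []
  | r :: rs =>
    if pvValid r then ((pvParts r).getD 0 "", (pvIPairs r).foldl pvIupd (none, none, false)) :: pvCompiled rs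
    else pvCompiled rs
def pvProj (e : String × Option Int × Option Int × Bool) : String × Option Int × Option Int :=
  (e.1, e.2.1, e.2.2.1)
def pvMtc (v : Option Int) (lo hi : Option Int) : Bool :=
  (match lo with | none => true | some l => match v with | none => false | some x => decide (l < x)) &&
  (match hi with | none => true | some h => match v with | none => false | some x => decide (x < h))
def pvCmp (v : Int) (p : String × Int) : Bool :=
  if p.1 = "<" then decide (v < p.2) else if p.1 = ">" then decide (p.2 < v) else true
def pvVOf (row : List String) : Option Int := (PySem.List.pyGet? row 3).bind PySem.Int.ofStr?
def pvUpd (b : String) (row : List String) : List String :=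
  if row.length < 5 then row ++ [b] else row.set 4 b
def pvApply (cs : List (String × Option Int × Option Int × Bool)) (row : List String) :
    List String :=
  cs.foldl (fun r e => if pvMtc (pvVOf row) e.2.1 e.2.2.1 then pvUpd e.1 r else r) row
def pvBRow (cs : List (String × Option Int × Option Int × Bool)) (v : Option Int)
    (row : List String) : List String :=
  match (cs.reverse.find? (fun e => pvMtc v e.2.1 e.2.2.1)).map (fun e => e.1) with
  | none => row
  | some b => pvUpd b row

theorem pv_fuel (n : Nat) : (PySem.Int.floordiv ((n : Int) + 1) 4).toNat = (n+1)/4 := by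
  rw [PySem.Int.floordiv_eq_ediv_of_pos (by norm_num : (0:Int) < 4)]
  omega

theorem pv_getNat {α : Type} (l : List α) (i : Nat) (d : α) (h : i < l.length) :
    PySem.List.pyGet? l (i : Int) = some (l.getD i d) := by
  rw [PySem.List.pyGet?_natCast, List.getElem?_eq_getElem h, List.getD_eq_getElem?_getD,
    List.getElem?_eq_getElem h]
  rfl

theorem pv_range_shift {α : Type} (g : Nat → α) (m k0 : Nat) :
    (List.range (m+1)).map (fun j => g (k0+j)) = g k0 :: (List.range m).map (fun j => g (k0+1+j)) := by
  rw [List.range_succ_eq_map, List.map_cons, List.map_map]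
  congr 1
  apply List.map_congr_left; intro j _
  simp only [Function.comp_apply]
  congr 1; omega

theorem pvA_while_spec (toks : List String) : ∀ (m k0 : Nat) (va co : List String) (th : List Int),
    4*(k0+m) ≤ toks.length + 1 →
    (∀ j, j < m → (PySem.Int.ofStr? (toks.getD (4*(k0+j)+2) "")).isSome = true) →
    pvA_while toks m (4*(k0:Int)) va co th =
      some (va ++ (List.range m).map (fun j => toks.getD (4*(k0+j)) ""),
            co ++ (List.range m).map (fun j => toks.getD (4*(k0+j)+1) ""),
            th ++ (List.range m).map (fun j => (PySem.Int.ofStr? (toks.getD (4*(k0+j)+2) "")).getD 0)) := by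
  intro m
  induction m with
  | zero => intro k0 va co th _ _; simp [pvA_while]
  | succ m ih =>
    intro k0 va co th hb hok
    have e0 : (4*(k0:Int)+0) = ((4*k0 : Nat):Int) := by push_cast; ring
    have e1 : (4*(k0:Int)+1) = ((4*k0+1 : Nat):Int) := by push_cast; ring
    have e2 : (4*(k0:Int)+2) = ((4*k0+2 : Nat):Int) := by push_cast; ring
    obtain ⟨t, ht⟩ := Option.isSome_iff_exists.mp
      (by simpa using hok 0 (by omega) :
        (PySem.Int.ofStr? (toks.getD (4*k0+2) "")).isSome = true)
    have step : pvA_while toks (m+1) (4*(k0:Int)) va co th =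
        pvA_while toks m (4*((k0+1:Nat):Int)) (va ++ [toks.getD (4*k0) ""])
          (co ++ [toks.getD (4*k0+1) ""]) (th ++ [t]) := by
      rw [pvA_while, e0, e1, e2, pv_getNat toks (4*k0) "" (by omega),
        pv_getNat toks (4*k0+1) "" (by omega), pv_getNat toks (4*k0+2) "" (by omega)]
      simp only [ht]
      rfl
    rw [step, ih (k0+1) _ _ _ (by omega)
      (fun j hj => by
        have h := hok (j+1) (by omega)
        simpa [show k0+1+j = k0+(j+1) from by ring] using h)]
    rw [pv_range_shift (g := fun i => toks.getD (4*i) "") m k0,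
      pv_range_shift (g := fun i => toks.getD (4*i+1) "") m k0,
      pv_range_shift (g := fun i => (PySem.Int.ofStr? (toks.getD (4*i+2) "")).getD 0) m k0, ht]
    simp [List.append_assoc]

-- B's threshold-position loop: range(2, len(toks), 4) enumerated as 2+4j
theorem pv_pyRange24 (n : Nat) :
    PySem.List.pyRange 2 (n : Int) 4 =
      (List.range ((n+1)/4)).map (fun j => ((2+4*j : Nat) : Int)) := by
  rw [PySem.List.pyRange_of_pos 2 (n : Int) (by norm_num : (0:Int) < 4)]
  have hcnt : (if (2:Int) < (n:Int) then (((n:Int) - 2 + 4 - 1) / 4).toNat else 0) = (n+1)/4 := by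
    split <;> omega
  rw [hcnt]
  apply List.map_congr_left
  intro j _
  push_cast; ring

theorem pvB_bounds_spec (toks : List String) : ∀ (m k0 : Nat) (lo hi : Option Int) (c : Bool),
    4*(k0+m) ≤ toks.length + 1 →
    (∀ j, j < m → (PySem.Int.ofStr? (toks.getD (4*(k0+j)+2) "")).isSome = true) →
    pvB_bounds toks ((List.range m).map (fun j => ((2+4*(k0+j) : Nat) : Int))) (lo, hi) =
      some ((((List.range m).map (fun j => (toks.getD (4*(k0+j)+1) "",
              (PySem.Int.ofStr? (toks.getD (4*(k0+j)+2) "")).getD 0))).foldl pvIupd (lo, hi, c)).1,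
            (((List.range m).map (fun j => (toks.getD (4*(k0+j)+1) "",
              (PySem.Int.ofStr? (toks.getD (4*(k0+j)+2) "")).getD 0))).foldl pvIupd (lo, hi, c)).2.1) := by
  intro m
  induction m with
  | zero => intro k0 lo hi c _ _; simp [pvB_bounds]
  | succ m ih =>
    intro k0 lo hi c hb hok
    obtain ⟨t, ht⟩ := Option.isSome_iff_exists.mp
      (by simpa using hok 0 (by omega) :
        (PySem.Int.ofStr? (toks.getD (4*k0+2) "")).isSome = true)
    rw [pv_range_shift (g := fun i => ((2+4*i : Nat) : Int)) m k0,
      pv_range_shift (g := fun i => (toks.getD (4*i+1) "",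
        (PySem.Int.ofStr? (toks.getD (4*i+2) "")).getD 0)) m k0]
    have em1 : ((2+4*k0 : Nat) : Int) - 1 = ((4*k0+1 : Nat) : Int) := by push_cast; ring
    have em2 : ((2+4*k0 : Nat) : Int) = ((4*k0+2 : Nat) : Int) := by push_cast; ring
    have hop := pv_getNat toks (4*k0+1) "" (by omega)
    have hth : (PySem.List.pyGet? toks ((4*k0+2 : Nat) : Int)).bind PySem.Int.ofStr? = some t := by
      rw [pv_getNat toks (4*k0+2) "" (by omega)]
      simpa using ht
    rw [pvB_bounds, em1, hop]
    rw [em2] at *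
    simp only [hth]
    have hrec : ∀ (lo' hi' : Option Int) (c' : Bool),
        pvB_bounds toks ((List.range m).map (fun j => ((2+4*(k0+1+j) : Nat) : Int))) (lo', hi') =
          some ((((List.range m).map (fun j => (toks.getD (4*(k0+1+j)+1) "",
              (PySem.Int.ofStr? (toks.getD (4*(k0+1+j)+2) "")).getD 0))).foldl pvIupd (lo', hi', c')).1,
            (((List.range m).map (fun j => (toks.getD (4*(k0+1+j)+1) "",
              (PySem.Int.ofStr? (toks.getD (4*(k0+1+j)+2) "")).getD 0))).foldl pvIupd (lo', hi', c')).2.1) := by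
      intro lo' hi' c'
      have := ih (k0+1) lo' hi' c' (by omega)
        (fun j hj => by
          have h := hok (j+1) (by omega)
          simpa [show k0+1+j = k0+(j+1) from by ring] using h)
      simpa using this
    rw [List.foldl_cons]
    by_cases h1 : toks.getD (4*k0+1) "" = "<"
    · rw [if_pos h1]
      have hu : pvIupd (lo, hi, c)
          (toks.getD (4*k0+1) "", (PySem.Int.ofStr? (toks.getD (4*k0+2) "")).getD 0)
          = (lo, some (match hi with | none => t | some h => min h t), true) := by
        simp only [pvIupd, ht]
        rw [if_pos h1]
        cases hi <;> rfl
      rw [hu]; exact hrec _ _ true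
    · by_cases h2 : toks.getD (4*k0+1) "" = ">"
      · rw [if_neg h1, if_pos h2]
        have hu : pvIupd (lo, hi, c)
            (toks.getD (4*k0+1) "", (PySem.Int.ofStr? (toks.getD (4*k0+2) "")).getD 0)
            = (some (match lo with | none => t | some l => max l t), hi, true) := by
          simp only [pvIupd, ht]
          rw [if_neg h1, if_pos h2]
          cases lo <;> rfl
        rw [hu]; exact hrec _ _ true
      · rw [if_neg h1, if_neg h2]
        have hu : pvIupd (lo, hi, c)
            (toks.getD (4*k0+1) "", (PySem.Int.ofStr? (toks.getD (4*k0+2) "")).getD 0)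
            = (lo, hi, c) := by
          simp only [pvIupd]
          rw [if_neg h1, if_neg h2]
        rw [hu]; exact hrec _ _ c

theorem pvA_flag_some (ps : List (String × Int)) : ∀ (v : Int) (flag : Bool),
    pvA_flag (some v) (ps.map (fun p => p.1)) (ps.map (fun p => p.2)) flag =
      some (flag && ps.all (pvCmp v)) := by
  induction ps with
  | nil => intro v flag; simp [pvA_flag]
  | cons p ps ih =>
    intro v flag
    by_cases h1 : p.1 = "<"
    · cases flag <;> simp [pvA_flag, h1, ih, pvCmp]
    · by_cases h2 : p.1 = ">"
      · cases flag <;> simp [pvA_flag, h2, ih, pvCmp]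
      · simp [pvA_flag, h1, h2, ih, pvCmp]

theorem pvA_flag_noop (ps : List (String × Int)) (h : ps.all (fun p => !(p.1 = "<" || p.1 = ">"))) :
    ∀ (v? : Option Int) (flag : Bool),
    pvA_flag v? (ps.map (fun p => p.1)) (ps.map (fun p => p.2)) flag = some flag := by
  induction ps with
  | nil => intro v? flag; simp [pvA_flag]
  | cons p ps ih =>
    simp only [List.all_cons, Bool.and_eq_true] at h
    intro v? flag
    have h1 : ¬ p.1 = "<" := by
      intro hc; simp [hc] at h
    have h2 : ¬ p.1 = ">" := by
      intro hc; simp [hc] at h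
    simp [pvA_flag, h1, h2, ih h.2]

theorem pvIupd_mtc (ps : List (String × Int)) : ∀ (lo hi : Option Int) (c : Bool) (v : Int),
    pvMtc (some v) (ps.foldl pvIupd (lo, hi, c)).1 (ps.foldl pvIupd (lo, hi, c)).2.1 =
      (pvMtc (some v) lo hi && ps.all (pvCmp v)) := by
  induction ps with
  | nil => intro lo hi c v; simp
  | cons p ps ih =>
    intro lo hi c v
    by_cases h1 : p.1 = "<"
    · rw [List.foldl_cons, show pvIupd (lo, hi, c) p =
        (lo, some (match hi with | none => p.2 | some h => min h p.2), true) by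
          simp [pvIupd, h1]]
      rw [ih]
      cases hi <;> simp [pvMtc, pvCmp, h1, lt_min_iff, Bool.decide_and,
        Bool.and_assoc, Bool.and_comm, Bool.and_left_comm]
    · by_cases h2 : p.1 = ">"
      · rw [List.foldl_cons, show pvIupd (lo, hi, c) p =
          (some (match lo with | none => p.2 | some l => max l p.2), hi, true) by
            simp [pvIupd, h1, h2]]
        rw [ih]
        cases lo <;> simp [pvMtc, pvCmp, h1, h2, max_lt_iff, Bool.decide_and,
          Bool.and_assoc, Bool.and_comm, Bool.and_left_comm]
      · rw [List.foldl_cons, show pvIupd (lo, hi, c) p = (lo, hi, c) by simp [pvIupd, h1, h2]]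
        simp [ih, pvCmp, h1, h2]

theorem pvIupd_constr (ps : List (String × Int)) : ∀ (lo hi : Option Int) (c : Bool),
    (ps.foldl pvIupd (lo, hi, c)).2.2 = (c || ps.any (fun p => p.1 = "<" || p.1 = ">")) := by
  induction ps with
  | nil => intro lo hi c; simp
  | cons p ps ih =>
    intro lo hi c
    by_cases h1 : p.1 = "<"
    · simp [pvIupd, h1, ih]
    · by_cases h2 : p.1 = ">"
      · simp [pvIupd, h1, h2, ih]
      · simp [pvIupd, h1, h2, ih]

theorem pvIupd_noop (ps : List (String × Int))
    (h : ps.all (fun p => !(p.1 = "<" || p.1 = ">"))) (s : Option Int × Option Int × Bool) :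
    ps.foldl pvIupd s = s := by
  induction ps with
  | nil => simp
  | cons p ps ih =>
    simp only [List.all_cons, Bool.and_eq_true] at h
    have h1 : ¬ p.1 = "<" := by intro hc; simp [hc] at h
    have h2 : ¬ p.1 = ">" := by intro hc; simp [hc] at h
    rw [List.foldl_cons, show pvIupd s p = s by simp [pvIupd, h1, h2], ih h.2]

theorem pv_set_append {α : Type} : ∀ (done : List α) (row row' : α) (rest : List α),
    (done ++ row :: rest).set done.length row' = done ++ row' :: rest := by
  intro done
  induction done with
  | nil => intro row row' rest; rfl
  | cons d ds ih => intro row row' rest; simp [List.set_cons_succ, ih]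

theorem pvIPairs_eq (r : String) : pvIPairs r =
    (List.range (pvNP r)).map (fun j => ((pvToks r).getD (4*j+1) "",
      (PySem.Int.ofStr? ((pvToks r).getD (4*j+2) "")).getD 0)) := by
  simp [pvIPairs, pvPairs, List.map_map]

theorem pvVOf_eq (row : List String) :
    pvVOf row = row[3]?.bind PySem.Int.ofStr? := by
  rw [pvVOf, show (3:Int) = ((3:Nat):Int) from rfl, PySem.List.pyGet?_natCast]

theorem pvVOf_some (row : List String) (h : 3 < row.length) :
    pvVOf row = PySem.Int.ofStr? (row.getD 3 "") := by
  rw [pvVOf_eq, List.getElem?_eq_getElem h, List.getD_eq_getElem?_getD,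
    List.getElem?_eq_getElem h]
  rfl

theorem pvUpd_len (b : String) (r : List String) : r.length ≤ (pvUpd b r).length := by
  unfold pvUpd; split <;> simp

theorem pvUpd_keep3 (b : String) (r : List String) (h : 3 < r.length) :
    (pvUpd b r)[3]? = r[3]? ∧ 3 < (pvUpd b r).length := by
  unfold pvUpd; split
  · constructor
    · rw [List.getElem?_append_left h]
    · simp; omega
  · constructor
    · rw [List.getElem?_set_ne (by omega)]
    · simp [h]

theorem pvUpd_upd (b b' : String) (row : List String) (h : 4 ≤ row.length) :
    pvUpd b (pvUpd b' row) = pvUpd b row := by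
  by_cases h5 : row.length < 5
  · have h1 : pvUpd b' row = row ++ [b'] := by unfold pvUpd; rw [if_pos h5]
    have h2 : pvUpd b row = row ++ [b] := by unfold pvUpd; rw [if_pos h5]
    rw [h1, h2]
    unfold pvUpd
    rw [if_neg (by simp; omega)]
    rw [show (4:Nat) = row.length from by omega, pv_set_append row b' b []]
  · have h1 : pvUpd b' row = row.set 4 b' := by unfold pvUpd; rw [if_neg h5]
    have h2 : pvUpd b row = row.set 4 b := by unfold pvUpd; rw [if_neg h5]
    rw [h1, h2]
    unfold pvUpd
    rw [if_neg (by simp; omega), List.set_set]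

theorem pv_fold_keep3 (P : (String × Option Int × Option Int × Bool) → Bool) :
    ∀ (cs : List (String × Option Int × Option Int × Bool)) (r : List String), 3 < r.length →
    (cs.foldl (fun acc e => if P e then pvUpd e.1 acc else acc) r)[3]? = r[3]? ∧
      3 < (cs.foldl (fun acc e => if P e then pvUpd e.1 acc else acc) r).length := by
  intro cs
  induction cs with
  | nil => intro r h; exact ⟨rfl, h⟩
  | cons e cs ih =>
    intro r h
    rw [List.foldl_cons]
    by_cases hp : P e = true
    · rw [if_pos hp]
      obtain ⟨k1, k2⟩ := pvUpd_keep3 e.1 r h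
      obtain ⟨i1, i2⟩ := ih (pvUpd e.1 r) k2
      exact ⟨by rw [i1, k1], i2⟩
    · rw [if_neg hp]; exact ih r h

theorem pv_fold_len (P : (String × Option Int × Option Int × Bool) → Bool) :
    ∀ (cs : List (String × Option Int × Option Int × Bool)) (r : List String),
    r.length ≤ (cs.foldl (fun acc e => if P e then pvUpd e.1 acc else acc) r).length := by
  intro cs
  induction cs with
  | nil => intro r; simp
  | cons e cs ih =>
    intro r
    rw [List.foldl_cons]
    by_cases hp : P e = true
    · rw [if_pos hp]
      exact le_trans (pvUpd_len e.1 r) (ih (pvUpd e.1 r))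
    · rw [if_neg hp]; exact ih r

theorem pvApply_stable (cs : List (String × Option Int × Option Int × Bool))
    (row : List String) (h : 3 < row.length) :
    (pvApply cs row)[3]? = row[3]? ∧ 3 < (pvApply cs row).length :=
  pv_fold_keep3 (fun e => pvMtc (pvVOf row) e.2.1 e.2.2.1) cs row h

theorem pv_mapM_some {α β : Type} (f : α → Option β) (g : α → β) :
    ∀ (l : List α), (∀ x ∈ l, f x = some (g x)) → l.mapM f = some (l.map g) := by
  intro l
  induction l with
  | nil => intro _; rfl
  | cons a l ih =>
    intro h
    rw [List.mapM_cons, h a (by simp), ih (fun x hx => h x (by simp [hx]))]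
    rfl

theorem pvCompiled_length (rs : List String) :
    (pvCompiled rs).length = rs.countP pvValid := by
  induction rs with
  | nil => rfl
  | cons r rs ih =>
    by_cases h : pvValid r = true
    · simp [pvCompiled, h, List.countP_cons, ih]
    · have h' : pvValid r = false := by revert h; cases pvValid r <;> simp
      simp [pvCompiled, h, List.countP_cons, ih, h']

theorem pvCompiled_mem (rs : List String) (e : String × Option Int × Option Int × Bool)
    (he : e ∈ pvCompiled rs) : ∃ r ∈ rs, pvValid r = true ∧
      e = ((pvParts r).getD 0 "", (pvIPairs r).foldl pvIupd (none, none, false)) := by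
  induction rs with
  | nil => simp [pvCompiled] at he
  | cons r rs ih =>
    by_cases h : pvValid r = true
    · rw [pvCompiled, if_pos h] at he
      rcases List.mem_cons.mp he with h1 | h1
      · exact ⟨r, by simp, h, h1⟩
      · obtain ⟨r', hm, hv, he'⟩ := ih h1
        exact ⟨r', by simp [hm], hv, he'⟩
    · rw [pvCompiled, if_neg h] at he
      obtain ⟨r', hm, hv, he'⟩ := ih he
      exact ⟨r', by simp [hm], hv, he'⟩

theorem pvCompiled_constr (rs : List String) (e : String × Option Int × Option Int × Bool)
    (he : e ∈ pvCompiled rs) (hc : e.2.2.2 = false) : e.2.1 = none ∧ e.2.2.1 = none := by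
  obtain ⟨r, _, _, rfl⟩ := pvCompiled_mem rs e he
  simp only at hc ⊢
  have hany := pvIupd_constr (pvIPairs r) none none false
  rw [Bool.false_or] at hany
  have hanyf : (pvIPairs r).any (fun p => p.1 = "<" || p.1 = ">") = false := by
    rw [← hany]; exact hc
  have hno : (pvIPairs r).all (fun p => !(p.1 = "<" || p.1 = ">")) = true := by
    rw [List.all_eq_true]
    intro p hp
    have := List.any_eq_false.mp hanyf p hp
    simpa using this
  rw [pvIupd_noop (pvIPairs r) hno (none, none, false)]
  exact ⟨rfl, rfl⟩

theorem pvCompiled_any (rs : List String) :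
    (pvCompiled rs).any (fun e => e.2.2.2) = rs.any pvConstr := by
  induction rs with
  | nil => rfl
  | cons r rs ih =>
    by_cases h : pvValid r = true
    · rw [pvCompiled, if_pos h, List.any_cons, List.any_cons, ih]
      congr 1
      rw [pvIupd_constr (pvIPairs r) none none false]
      rw [pvConstr, h, Bool.true_and, Bool.false_or, pvIPairs, List.any_map]
      rfl
    · have h' : pvValid r = false := by revert h; cases pvValid r <;> simp
      rw [pvCompiled, if_neg h, List.any_cons, ih,
        show pvConstr r = false by simp [pvConstr, h']]
      simp

theorem pvA_rows_map (binID : String) (cond : List String) (thresh : List Int)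
    (f : List String → Bool) :
    ∀ (rows done : List (List String)) (d0 : List String),
    (∀ row ∈ rows, pvA_flag (pvVOf row) cond thresh true = some (f row)) →
    pvA_rows binID cond thresh
        (PySem.List.pyRange ((done.length : Nat) : Int) (((done.length + rows.length : Nat)) : Int) 1)
        (d0 :: (done ++ rows))
      = some (d0 :: (done ++ rows.map (fun row => if f row then pvUpd binID row else row))) := by
  intro rows
  induction rows with
  | nil =>
    intro done d0 _
    simp [PySem.List.pyRange, pvA_rows]
  | cons row rest ih =>
    intro done d0 hf
    have hpeel : PySem.List.pyRange ((done.length : Nat) : Int)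
        ((done.length + (row :: rest).length : Nat) : Int) 1 =
        ((done.length : Nat) : Int) ::
          PySem.List.pyRange (((done.length : Nat) : Int) + 1)
            ((done.length + (row :: rest).length : Nat) : Int) 1 :=
      PySem.List.pyRange_one_cons (by push_cast [List.length_cons]; omega)
    have hcast : ((done.length : Nat) : Int) + 1 = ((done.length + 1 : Nat) : Int) := by
      push_cast; ring
    have hget : PySem.List.pyGet? (d0 :: (done ++ row :: rest))
        (((done.length : Nat) : Int) + 1) = some row := by
      rw [hcast, PySem.List.pyGet?_natCast]
      simp only [List.getElem?_cons_succ]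
      rw [List.getElem?_append_right (le_refl _)]
      simp
    rw [hpeel, pvA_rows, hget]
    rw [show ((some row).bind fun r => (PySem.List.pyGet? r 3).bind PySem.Int.ofStr?) = pvVOf row
      from rfl, hf row (by simp)]
    split
    · next heq => exact absurd heq (by simp)
    · next flag heq =>
      injection heq with heq'
      subst heq'
      by_cases hfr : f row = true
      · rw [if_pos hfr]
        split
        · next heq2 => exact absurd heq2 (by simp)
        · next row1 heq2 =>
          injection heq2 with heq2'
          subst heq2'
          show pvA_rows binID cond thresh
              (PySem.List.pyRange (((done.length : Nat) : Int) + 1)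
                ((done.length + (row :: rest).length : Nat) : Int) 1)
              (PySem.List.pySetD (d0 :: (done ++ row :: rest)) (((done.length : Nat) : Int) + 1)
                (if row.length < 5 then row ++ [binID] else row.set 4 binID)) = _
          have hset : PySem.List.pySetD (d0 :: (done ++ row :: rest))
              (((done.length : Nat) : Int) + 1)
              (if row.length < 5 then row ++ [binID] else row.set 4 binID)
              = d0 :: (done ++ pvUpd binID row :: rest) := by
            rw [hcast, PySem.List.pySetD_natCast, List.set_cons_succ, pv_set_append]
            rfl
          rw [hset]
          have hih := ih (done ++ [pvUpd binID row]) d0 (fun r hr => hf r (by simp [hr]))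
          rw [show (((done ++ [pvUpd binID row]).length : Nat) : Int)
              = ((done.length : Nat) : Int) + 1 from by simp <;> omega] at hih
          rw [show (((done ++ [pvUpd binID row]).length + rest.length : Nat) : Int)
              = ((done.length + (row :: rest).length : Nat) : Int) from by simp <;> omega] at hih
          rw [show (done ++ [pvUpd binID row]) ++ rest = done ++ pvUpd binID row :: rest from by simp <;> omega] at hih
          rw [hih]
          simp [hfr]
      · rw [if_neg hfr]
        have hih := ih (done ++ [row]) d0 (fun r hr => hf r (by simp [hr]))
        rw [show (((done ++ [row]).length : Nat) : Int)
            = ((done.length : Nat) : Int) + 1 from by simp <;> omega] at hih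
        rw [show (((done ++ [row]).length + rest.length : Nat) : Int)
            = ((done.length + (row :: rest).length : Nat) : Int) from by simp <;> omega] at hih
        rw [show (done ++ [row]) ++ rest = done ++ row :: rest from by simp <;> omega] at hih
        rw [hih]
        simp [hfr]

theorem pvPairs_ok (r : String) (hok : pvRuleOK r = true) (hv : pvValid r = true) :
    ∀ j, j < pvNP r → (PySem.Int.ofStr? ((pvToks r).getD (4*(0+j)+2) "")).isSome = true := by
  intro j hj
  rw [pvRuleOK, hv] at hok
  simp only [Bool.not_true, Bool.false_or] at hok
  have := List.all_eq_true.mp hok (((pvToks r).getD (4*j+1) "", (pvToks r).getD (4*j+2) ""))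
    (by rw [pvPairs]; exact List.mem_map.mpr ⟨j, List.mem_range.mpr hj, rfl⟩)
  simpa using this

theorem pv_flag_char (r : String) (hok : pvRuleOK r = true) (hv : pvValid r = true)
    (row' : List String)
    (hside : pvConstr r = false ∨ (pvVOf row').isSome = true) :
    pvA_flag (pvVOf row') ((pvIPairs r).map (fun p => p.1)) ((pvIPairs r).map (fun p => p.2)) true
      = some (pvMtc (pvVOf row')
          ((pvIPairs r).foldl pvIupd (none, none, false)).1
          ((pvIPairs r).foldl pvIupd (none, none, false)).2.1) := by
  rcases hside with hcr | hsome
  · have hany : (pvIPairs r).any (fun p => p.1 = "<" || p.1 = ">") = false := by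
      rw [pvConstr, hv, Bool.true_and] at hcr
      rw [pvIPairs, List.any_map]
      simpa using hcr
    have hall : (pvIPairs r).all (fun p => !(p.1 = "<" || p.1 = ">")) = true := by
      rw [List.all_eq_true]
      intro p hp
      simpa using List.any_eq_false.mp hany p hp
    rw [pvA_flag_noop (pvIPairs r) hall, pvIupd_noop (pvIPairs r) hall]
    cases pvVOf row' <;> simp [pvMtc]
  · obtain ⟨x, hx⟩ := Option.isSome_iff_exists.mp hsome
    rw [hx, pvA_flag_some (pvIPairs r) x true, pvIupd_mtc (pvIPairs r) none none false x]
    simp [pvMtc]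

theorem pvA_ruleLoop_map :
    ∀ (rs : List String) (rows : List (List String)) (d0 : List String)
      (cs : List (String × Option Int × Option Int × Bool)),
    (∀ r ∈ rs, pvRuleOK r = true) →
    ((∃ r ∈ rs, pvConstr r = true) →
      ∀ row ∈ rows, 3 < row.length ∧ (PySem.Int.ofStr? (row.getD 3 "")).isSome = true) →
    pvA_ruleLoop ((rows.length : Nat) : Int) rs (d0 :: rows.map (pvApply cs)) =
      some (d0 :: rows.map (pvApply (cs ++ pvCompiled rs))) := by
  intro rs
  induction rs with
  | nil => intro rows d0 cs _ _; simp [pvA_ruleLoop, pvCompiled]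
  | cons r rs ih =>
    intro rows d0 cs hok hcon
    have hok' : ∀ r' ∈ rs, pvRuleOK r' = true := fun r' h => hok r' (by simp [h])
    have hcon' : (∃ r' ∈ rs, pvConstr r' = true) →
        ∀ row ∈ rows, 3 < row.length ∧ (PySem.Int.ofStr? (row.getD 3 "")).isSome = true :=
      fun ⟨r', hm, hc⟩ => hcon ⟨r', by simp [hm], hc⟩
    by_cases hv : pvValid r = true
    · have hlen : 2 ≤ ((PySem.Str.split? r ",").getD []).length := by
        have hv' := hv; rw [pvValid, decide_eq_true_iff, pvParts_eq] at hv'; exact hv'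
      have hbin : (PySem.List.pyGet? ((PySem.Str.split? r ",").getD []) 0).getD ""
          = (pvParts r).getD 0 "" := by
        rw [show (0:Int) = ((0:Nat):Int) from rfl,
          pv_getNat ((PySem.Str.split? r ",").getD []) 0 "" (by omega)]
        rw [pvParts_eq]
        rfl
      have htoks : PySem.Str.split₀ ((PySem.List.pyGet? ((PySem.Str.split? r ",").getD []) 1).getD "")
          = pvToks r := by
        rw [show (1:Int) = ((1:Nat):Int) from rfl,
          pv_getNat ((PySem.Str.split? r ",").getD []) 1 "" (by omega)]
        rw [pvToks, pvParts_eq]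
        rfl
      have hfuel : (PySem.Int.floordiv (((pvToks r).length : Int) + 1) 4).toNat = pvNP r :=
        pv_fuel (pvToks r).length
      have hcond : ([] : List String) ++ (List.range (pvNP r)).map
          (fun j => (pvToks r).getD (4*(0+j)+1) "") = (pvIPairs r).map (fun p => p.1) := by
        rw [pvIPairs_eq, List.map_map]
        simp
      have hthresh : ([] : List Int) ++ (List.range (pvNP r)).map
          (fun j => (PySem.Int.ofStr? ((pvToks r).getD (4*(0+j)+2) "")).getD 0)
          = (pvIPairs r).map (fun p => p.2) := by
        rw [pvIPairs_eq, List.map_map]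
        simp
      have hfmem : ∀ row' ∈ rows.map (pvApply cs),
          pvA_flag (pvVOf row') ((pvIPairs r).map (fun p => p.1)) ((pvIPairs r).map (fun p => p.2)) true
            = some ((fun rr => pvMtc (pvVOf rr)
                ((pvIPairs r).foldl pvIupd (none, none, false)).1
                ((pvIPairs r).foldl pvIupd (none, none, false)).2.1) row') := by
        intro row' hm
        obtain ⟨row, hrow, rfl⟩ := List.mem_map.mp hm
        apply pv_flag_char r (hok r (by simp)) hv
        by_cases hcr : pvConstr r = true
        · right
          obtain ⟨hl, hp⟩ := hcon ⟨r, by simp, hcr⟩ row hrow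
          rw [pvVOf_eq, (pvApply_stable cs row hl).1, ← pvVOf_eq, pvVOf_some row hl]
          exact hp
        · left
          revert hcr; cases pvConstr r <;> simp
      have hrows := pvA_rows_map ((pvParts r).getD 0 "")
        ((pvIPairs r).map (fun p => p.1)) ((pvIPairs r).map (fun p => p.2))
        (fun rr => pvMtc (pvVOf rr)
          ((pvIPairs r).foldl pvIupd (none, none, false)).1
          ((pvIPairs r).foldl pvIupd (none, none, false)).2.1)
        (rows.map (pvApply cs)) [] d0 hfmem
      rw [show ((([] : List (List String)).length : Nat) : Int) = (0:Int) from rfl] at hrows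
      rw [show ((([] : List (List String)).length + (rows.map (pvApply cs)).length : Nat) : Int)
          = ((rows.length : Nat) : Int) from by simp] at hrows
      rw [show ([] : List (List String)) ++ rows.map (pvApply cs) = rows.map (pvApply cs)
          from by simp] at hrows
      have hmapeq : rows.map ((fun rr => if pvMtc (pvVOf rr)
            ((pvIPairs r).foldl pvIupd (none, none, false)).1
            ((pvIPairs r).foldl pvIupd (none, none, false)).2.1
          then pvUpd ((pvParts r).getD 0 "") rr else rr) ∘ pvApply cs)
          = rows.map (pvApply (cs ++ [((pvParts r).getD 0 "", (pvIPairs r).foldl pvIupd (none, none, false))])) := by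
        apply List.map_congr_left
        intro row hrow
        have happ : pvApply (cs ++ [((pvParts r).getD 0 "", (pvIPairs r).foldl pvIupd (none, none, false))]) row
            = if pvMtc (pvVOf row)
                  ((pvIPairs r).foldl pvIupd (none, none, false)).1
                  ((pvIPairs r).foldl pvIupd (none, none, false)).2.1
              then pvUpd ((pvParts r).getD 0 "") (pvApply cs row) else pvApply cs row := by
          rw [pvApply, List.foldl_append]
          rfl
        rw [happ]
        simp only [Function.comp_apply]
        by_cases hcr : pvConstr r = true
        · obtain ⟨hl, _⟩ := hcon ⟨r, by simp, hcr⟩ row hrow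
          have hstab : pvVOf (pvApply cs row) = pvVOf row := by
            rw [pvVOf_eq, (pvApply_stable cs row hl).1, ← pvVOf_eq]
          rw [hstab]
        · have hcf : pvConstr r = false := by revert hcr; cases pvConstr r <;> simp
          have hnone := pvCompiled_constr [r]
            ((pvParts r).getD 0 "", (pvIPairs r).foldl pvIupd (none, none, false))
            (by rw [pvCompiled, if_pos hv]; simp [pvCompiled])
            (by
              simp only
              have hany := pvIupd_constr (pvIPairs r) none none false
              rw [Bool.false_or] at hany
              rw [hany]
              rw [pvConstr, hv, Bool.true_and] at hcf
              rw [pvIPairs, List.any_map]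
              simpa using hcf)
          simp only at hnone
          rw [hnone.1, hnone.2]
          simp [pvMtc]
      rw [pvA_ruleLoop, if_neg (by omega)]
      rw [hbin, htoks]
      show (match pvA_while (pvToks r)
          (PySem.Int.floordiv (((pvToks r).length : Int) + 1) 4).toNat 0 [] [] [] with
        | none => none
        | some (_fst, cond, thresh) =>
          match pvA_rows ((pvParts r).getD 0 "") cond thresh
              (PySem.List.pyRange 0 ((rows.length : Nat) : Int) 1)
              (d0 :: rows.map (pvApply cs)) with
          | none => none
          | some data' => pvA_ruleLoop ((rows.length : Nat) : Int) rs data') = _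
      rw [hfuel]
      have hwhile := pvA_while_spec (pvToks r) (pvNP r) 0 [] [] []
        (by have hnp : pvNP r = ((pvToks r).length + 1)/4 := rfl; omega)
        (pvPairs_ok r (hok r (by simp)) hv)
      simp only [Nat.cast_zero, mul_zero] at hwhile
      rw [hwhile]
      split
      · next heq => exact absurd heq (by simp)
      · next fst cond thresh heq =>
        simp only [Option.some.injEq, Prod.mk.injEq] at heq
        obtain ⟨he1, he2, he3⟩ := heq
        subst he2
        subst he3
        rw [hcond, hthresh, hrows]
        split
        · next heq2 => exact absurd heq2 (by simp)
        · next data' heq2 =>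
          injection heq2 with heq2'
          subst heq2'
          simp only [List.nil_append, List.map_map]
          rw [hmapeq]
          rw [ih rows d0
            (cs ++ [((pvParts r).getD 0 "", (pvIPairs r).foldl pvIupd (none, none, false))]) hok' hcon']
          rw [show (cs ++ [((pvParts r).getD 0 "", (pvIPairs r).foldl pvIupd (none, none, false))]) ++ pvCompiled rs
              = cs ++ pvCompiled (r :: rs) from by rw [pvCompiled, if_pos hv]; simp]
    · have hlt : ((PySem.Str.split? r ",").getD []).length < 2 := by
        revert hv; rw [pvValid]; intro hv
        have hc : ¬ (2 ≤ (pvParts r).length) := fun hc => hv (decide_eq_true hc)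
        rw [pvParts_eq] at hc
        omega
      rw [pvA_ruleLoop, if_pos hlt]
      rw [ih rows d0 cs hok' hcon']
      rw [show pvCompiled (r :: rs) = pvCompiled rs from by
        rw [pvCompiled, if_neg (by simp [hv])]]

theorem pvB_compile_spec : ∀ (rs : List String), (∀ r ∈ rs, pvRuleOK r = true) →
    pvB_compile rs = some ((pvCompiled rs).map pvProj) := by
  intro rs
  induction rs with
  | nil => intro _; rfl
  | cons r rs ih =>
    intro hok
    have ihr := ih (fun r' h => hok r' (by simp [h]))
    by_cases hv : pvValid r = true
    · have hlen : 2 ≤ ((PySem.Str.split? r ",").getD []).length := by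
        have hv' := hv; rw [pvValid, decide_eq_true_iff, pvParts_eq] at hv'; exact hv'
      have htoks : ((PySem.Str.split? r ",").getD []).getD 1 "" = (pvParts r).getD 1 "" := by
        rw [pvParts_eq]
      have hbin : ((PySem.Str.split? r ",").getD []).getD 0 "" = (pvParts r).getD 0 "" := by
        rw [pvParts_eq]
      have hbounds := pvB_bounds_spec (pvToks r) (pvNP r) 0 none none false
        (by have hnp : pvNP r = ((pvToks r).length + 1)/4 := rfl; omega)
        (pvPairs_ok r (hok r (by simp)) hv)
      simp only [Nat.zero_add] at hbounds
      rw [pvB_compile, if_neg (by omega), htoks]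
      show (match pvB_bounds (PySem.Str.split₀ ((pvParts r).getD 1 ""))
          (PySem.List.pyRange 2 ((PySem.Str.split₀ ((pvParts r).getD 1 "")).length : Int) 4)
          (none, none) with
        | none => none
        | some lohi => (pvB_compile rs).map
            (fun l => (((PySem.Str.split? r ",").getD []).getD 0 "", lohi) :: l)) = _
      rw [show PySem.Str.split₀ ((pvParts r).getD 1 "") = pvToks r from rfl]
      rw [pv_pyRange24 (pvToks r).length,
        show ((pvToks r).length + 1)/4 = pvNP r from rfl]
      rw [hbounds, ihr, hbin]
      rw [show (List.range (pvNP r)).map (fun j => ((pvToks r).getD (4*j+1) "",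
            (PySem.Int.ofStr? ((pvToks r).getD (4*j+2) "")).getD 0))
          = pvIPairs r from (pvIPairs_eq r).symm]
      rw [show pvCompiled (r :: rs) = ((pvParts r).getD 0 "",
            (pvIPairs r).foldl pvIupd (none, none, false)) :: pvCompiled rs from by
        rw [pvCompiled, if_pos hv]]
      rfl
    · have hlt : ((PySem.Str.split? r ",").getD []).length < 2 := by
        revert hv; rw [pvValid]; intro hv
        have hc : ¬ (2 ≤ (pvParts r).length) := fun hc => hv (decide_eq_true hc)
        rw [pvParts_eq] at hc
        omega
      rw [pvB_compile, if_pos hlt, ihr, show pvCompiled (r :: rs) = pvCompiled rs from by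
        rw [pvCompiled, if_neg (by simp [hv])]]

theorem pvB_pick_spec (row : List String) :
    ∀ (ivs : List (String × Option Int × Option Int)) (best : Option String),
    (∀ e ∈ ivs, (e.2.1 = none ∧ e.2.2 = none) ∨ (pvVOf row).isSome = true) →
    pvB_pick row ivs best = some
      (match (ivs.reverse.find? (fun e => pvMtc (pvVOf row) e.2.1 e.2.2)).map (fun e => e.1) with
       | none => best | some b => some b) := by
  intro ivs
  induction ivs with
  | nil => intro best _; rfl
  | cons e rest ih =>
    intro best h
    have hrest := fun best' => ih best' (fun e' he' => h e' (by simp [he']))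
    rcases e with ⟨bid, lo, hi⟩
    rw [List.reverse_cons, List.find?_append]
    by_cases hun : lo = none ∧ hi = none
    · obtain ⟨rfl, rfl⟩ := hun
      rw [pvB_pick, if_pos ⟨rfl, rfl⟩, hrest (some bid),
        List.find?_cons_of_pos (p := fun e => pvMtc (pvVOf row) e.2.1 e.2.2)
          (a := (bid, none, none)) (l := []) rfl]
      rcases hr : rest.reverse.find? (fun e => pvMtc (pvVOf row) e.2.1 e.2.2) with _ | e' <;>
        simp [hr]
    · rcases h (bid, lo, hi) (by simp) with hc | hsome
      · exact absurd hc hun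
      · obtain ⟨x, hx⟩ := Option.isSome_iff_exists.mp hsome
        have hstep : pvB_pick row ((bid, lo, hi) :: rest) best =
            if pvMtc (pvVOf row) lo hi = true then pvB_pick row rest (some bid)
            else pvB_pick row rest best := by
          rw [pvB_pick, if_neg hun,
            show (PySem.List.pyGet? row 3).bind PySem.Int.ofStr? = pvVOf row from rfl, hx]
          cases lo <;> cases hi <;> rfl
        rw [hstep]
        by_cases hm : pvMtc (pvVOf row) lo hi = true
        · rw [if_pos hm, hrest (some bid),
            List.find?_cons_of_pos (p := fun e => pvMtc (pvVOf row) e.2.1 e.2.2)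
              (a := (bid, lo, hi)) (l := []) hm]
          rcases hr : rest.reverse.find? (fun e => pvMtc (pvVOf row) e.2.1 e.2.2) with _ | e' <;>
            simp [hr]
        · have hm' : pvMtc (pvVOf row) lo hi = false := by
            revert hm; cases pvMtc (pvVOf row) lo hi <;> simp
          rw [if_neg hm, hrest best,
            List.find?_cons_of_neg (p := fun e => pvMtc (pvVOf row) e.2.1 e.2.2)
              (a := (bid, lo, hi)) (l := []) (by simp [hm'])]
          rcases hr : rest.reverse.find? (fun e => pvMtc (pvVOf row) e.2.1 e.2.2) with _ | e' <;>
            simp [hr]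

theorem pvB_assign_spec (cs : List (String × Option Int × Option Int × Bool))
    (row : List String)
    (h : ∀ e ∈ cs, (e.2.1 = none ∧ e.2.2.1 = none) ∨ (pvVOf row).isSome = true) :
    pvB_assign (cs.map pvProj) row = some (pvBRow cs (pvVOf row) row) := by
  have hh : ∀ e' ∈ cs.map pvProj, (e'.2.1 = none ∧ e'.2.2 = none) ∨ (pvVOf row).isSome = true := by
    intro e' he'
    obtain ⟨e, he, rfl⟩ := List.mem_map.mp he'
    exact h e he
  rw [pvB_assign, pvB_pick_spec row (cs.map pvProj) none hh]
  rw [← List.map_reverse, List.find?_map]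
  rw [show ((fun e : String × Option Int × Option Int => pvMtc (pvVOf row) e.2.1 e.2.2) ∘ pvProj)
      = (fun e : String × Option Int × Option Int × Bool => pvMtc (pvVOf row) e.2.1 e.2.2.1)
    from funext (fun e => rfl)]
  rw [pvBRow]
  rcases hr : cs.reverse.find? (fun e => pvMtc (pvVOf row) e.2.1 e.2.2.1) with _ | e <;>
    simp [hr, pvProj, pvUpd]

theorem pvB_char (d0 : List String) (rest : List (List String)) (rules : List String)
    (hok : ∀ r ∈ rules, pvRuleOK r = true)
    (hcon : (∃ r ∈ rules, pvConstr r = true) →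
      ∀ row ∈ rest, 3 < row.length ∧ (PySem.Int.ofStr? (row.getD 3 "")).isSome = true) :
    Binning_alt (d0 :: rest) rules =
      ((if d0.length < 5 then d0 ++ ["Bincode"] else d0)
          :: rest.map (fun row => pvBRow (pvCompiled rules) (pvVOf row) row),
        ((rest.length : Nat) : Int)) := by
  have hside : ∀ row ∈ rest, ∀ e ∈ pvCompiled rules,
      (e.2.1 = none ∧ e.2.2.1 = none) ∨ (pvVOf row).isSome = true := by
    intro row hrow e he
    by_cases hb : e.2.2.2 = true
    · right
      have hany : rules.any pvConstr = true := by
        rw [← pvCompiled_any]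
        exact List.any_eq_true.mpr ⟨e, he, hb⟩
      obtain ⟨r, hr, hc⟩ := List.any_eq_true.mp hany
      obtain ⟨hl, hp⟩ := hcon ⟨r, hr, hc⟩ row hrow
      rw [pvVOf_some row hl]
      exact hp
    · left
      exact pvCompiled_constr rules e he (by revert hb; cases e.2.2.2 <;> simp)
  have hmm := pv_mapM_some (pvB_assign ((pvCompiled rules).map pvProj))
    (fun row => pvBRow (pvCompiled rules) (pvVOf row) row) rest
    (fun row hrow => pvB_assign_spec (pvCompiled rules) row (hside row hrow))
  rw [Binning_alt, pvB_compile_spec rules hok]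
  simp only
  rw [hmm]
  simp only
  congr 1
  simp

theorem pv_fold_shape (P : (String × Option Int × Option Int × Bool) → Bool)
    (row : List String) (hlen : 4 ≤ row.length) :
    ∀ (cs : List (String × Option Int × Option Int × Bool)),
    cs.foldl (fun r e => if P e then pvUpd e.1 r else r) row = row ∨
      ∃ b, cs.foldl (fun r e => if P e then pvUpd e.1 r else r) row = pvUpd b row := by
  intro cs
  induction cs using List.reverseRecOn with
  | nil => left; rfl
  | append_singleton cs e ih =>
    rw [List.foldl_append, List.foldl_cons, List.foldl_nil]
    by_cases hm : P e = true
    · rw [if_pos hm]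
      rcases ih with h | ⟨b, h⟩
      · right; exact ⟨e.1, by rw [h]⟩
      · right; exact ⟨e.1, by rw [h, pvUpd_upd e.1 b row hlen]⟩
    · rw [if_neg hm]; exact ih

theorem pv_fold_last (P : (String × Option Int × Option Int × Bool) → Bool)
    (row : List String) (hlen : 4 ≤ row.length) :
    ∀ (cs : List (String × Option Int × Option Int × Bool)),
    cs.foldl (fun r e => if P e then pvUpd e.1 r else r) row =
      match (cs.reverse.find? P).map (fun e => e.1) with
      | none => row
      | some b => pvUpd b row := by
  intro cs
  induction cs using List.reverseRecOn with
  | nil => rfl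
  | append_singleton cs e ih =>
    rw [List.foldl_append, List.foldl_cons, List.foldl_nil, List.reverse_append]
    simp only [List.reverse_cons, List.reverse_nil, List.nil_append, List.singleton_append,
      List.find?_cons]
    by_cases hm : P e = true
    · rw [if_pos hm, hm]
      simp only [Option.map_some]
      rcases pv_fold_shape P row hlen cs with h | ⟨b, h⟩
      · rw [h]
      · rw [h, pvUpd_upd e.1 b row hlen]
    · have hm' : P e = false := by revert hm; cases P e <;> simp
      rw [if_neg hm, hm']
      exact ih

theorem pv_bridge (cs : List (String × Option Int × Option Int × Bool))
    (row : List String)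
    (hside : 4 ≤ row.length ∨ cs.length ≤ 1) :
    pvApply cs row = pvBRow cs (pvVOf row) row := by
  rcases hside with hlen | hshort
  · rw [pvApply, pv_fold_last (fun e => pvMtc (pvVOf row) e.2.1 e.2.2.1) row hlen cs, pvBRow]
  · rcases cs with _ | ⟨e, cs2⟩
    · rfl
    · rcases cs2 with _ | ⟨e2, cs3⟩
      · rw [pvApply, pvBRow]
        simp only [List.foldl_cons, List.foldl_nil]
        rw [show ([e] : List (String × Option Int × Option Int × Bool)).reverse = [e] from rfl,
          List.find?_cons]
        by_cases hm : pvMtc (pvVOf row) e.2.1 e.2.2.1 = true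
        · rw [if_pos hm, hm]
          rfl
        · have hmf : pvMtc (pvVOf row) e.2.1 e.2.2.1 = false := by
            revert hm; cases pvMtc (pvVOf row) e.2.1 e.2.2.1 <;> simp
          rw [if_neg hm, hmf]
          rfl
      · simp only [List.length_cons] at hshort
        omega

theorem pvA_char (d0 : List String) (rest : List (List String)) (rules : List String)
    (hok : ∀ r ∈ rules, pvRuleOK r = true)
    (hcon : (∃ r ∈ rules, pvConstr r = true) →
      ∀ row ∈ rest, 3 < row.length ∧ (PySem.Int.ofStr? (row.getD 3 "")).isSome = true) :
    Binning (d0 :: rest) rules =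
      ((if d0.length < 5 then d0 ++ ["Bincode"] else d0)
          :: rest.map (pvApply (pvCompiled rules)),
        ((rest.length : Nat) : Int)) := by
  have hloop := pvA_ruleLoop_map rules rest
    (if d0.length < 5 then d0 ++ ["Bincode"] else d0) [] hok hcon
  rw [show rest.map (pvApply []) = rest from by
    rw [show pvApply [] = fun row => row from funext (fun row => rfl), List.map_id']] at hloop
  simp only [List.nil_append] at hloop
  rw [Binning, PySem.List.pyGet?_zero_cons]
  by_cases h5 : d0.length < 5
  · simp only [if_pos h5]
    rw [show PySem.List.pySetD (d0 :: rest) 0 (d0 ++ ["Bincode"]) = (d0 ++ ["Bincode"]) :: rest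
      from by
        rw [show (0:Int) = ((0:Nat):Int) from rfl, PySem.List.pySetD_natCast]
        rfl]
    rw [show (((d0 ++ ["Bincode"]) :: rest).length : Int) - 1 = ((rest.length : Nat) : Int)
      from by simp]
    rw [if_pos h5] at hloop
    rw [hloop]
  · simp only [if_neg h5]
    rw [show (((d0 :: rest)).length : Int) - 1 = ((rest.length : Nat) : Int) from by simp]
    rw [if_neg h5] at hloop
    rw [hloop]

theorem pv_apply_len_ge (cs : List (String × Option Int × Option Int × Bool))
    (row : List String) (h2 : 2 ≤ cs.length) (hshort : row.length < 4)
    (hall : ∀ e ∈ cs, pvMtc (pvVOf row) e.2.1 e.2.2.1 = true) :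
    row.length + 2 ≤ (pvApply cs row).length := by
  rcases cs with _ | ⟨e1, _ | ⟨e2, cs'⟩⟩
  · simp at h2
  · simp at h2
  · rw [pvApply, List.foldl_cons, List.foldl_cons, if_pos (hall e1 (by simp)),
      if_pos (hall e2 (by simp))]
    have l1 : (pvUpd e1.1 row).length = row.length + 1 := by
      rw [pvUpd, if_pos (by omega)]; simp
    have l2 : (pvUpd e2.1 (pvUpd e1.1 row)).length = row.length + 2 := by
      rw [pvUpd, if_pos (by omega)]; simp [l1]
    calc row.length + 2 = (pvUpd e2.1 (pvUpd e1.1 row)).length := l2.symm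
      _ ≤ _ := pv_fold_len (fun e => pvMtc (pvVOf row) e.2.1 e.2.2.1) cs' (pvUpd e2.1 (pvUpd e1.1 row))

theorem pv_brow_len (cs : List (String × Option Int × Option Int × Bool))
    (row : List String) (v : Option Int) (hne : cs ≠ []) (hshort : row.length < 4)
    (hall : ∀ e ∈ cs, pvMtc v e.2.1 e.2.2.1 = true) :
    (pvBRow cs v row).length = row.length + 1 := by
  have hrev : cs.reverse ≠ [] := by simpa using hne
  rcases hr : cs.reverse with _ | ⟨h, t⟩
  · exact absurd hr hrev
  · have hh : pvMtc v h.2.1 h.2.2.1 = true :=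
      hall h (by rw [← List.mem_reverse, hr]; simp)
    rw [pvBRow, hr, List.find?_cons, hh]
    simp only [Option.map_some]
    rw [pvUpd, if_pos (by omega)]
    simp

theorem pv_main_unchanged (d0 : List String) (rest : List (List String)) (rules : List String)
    (hok : ∀ r ∈ rules, pvRuleOK r = true)
    (hcon : (∃ r ∈ rules, pvConstr r = true) →
      ∀ row ∈ rest, 3 < row.length ∧ (PySem.Int.ofStr? (row.getD 3 "")).isSome = true)
    (hnd : ¬ D_Binning (d0 :: rest) rules) :
    Binning (d0 :: rest) rules = Binning_alt (d0 :: rest) rules := by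
  rw [pvA_char d0 rest rules hok hcon, pvB_char d0 rest rules hok hcon]
  have hmaps : rest.map (pvApply (pvCompiled rules)) =
      rest.map (fun row => pvBRow (pvCompiled rules) (pvVOf row) row) := by
    apply List.map_congr_left
    intro row hrow
    apply pv_bridge
    by_cases hany : rules.any pvConstr = true
    · left
      obtain ⟨r, hr, hc⟩ := List.any_eq_true.mp hany
      have := (hcon ⟨r, hr, by simpa using hc⟩ row hrow).1
      omega
    · have hanyf : rules.any pvConstr = false := by
        revert hany; cases rules.any pvConstr <;> simp
      have hallf : ∀ r ∈ rules, pvConstr r = false := by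
        intro r hr
        have := List.any_eq_false.mp hanyf r hr
        simpa using this
      by_cases hcnt : 2 ≤ rules.countP pvValid
      · left
        have hnoshort : ¬ ∃ row' ∈ rest, row'.length < 4 := by
          intro hex
          exact hnd ⟨by rw [← pvCount_eq]; exact hcnt, by simpa using hex⟩
        by_contra hcon4
        exact hnoshort ⟨row, hrow, by omega⟩
      · right
        rw [pvCompiled_length]
        omega
  rw [hmaps]

-- ===== VERDICT (by name: the statement is the Claim_ definition above) =====
theorem Binning_spec : Claim_unchanged_Binning := by
  intro data rules hdom hpre
  intro hnd
  obtain ⟨hne, hok, hcon⟩ := hpre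
  rcases data with _ | ⟨d0, rest⟩
  · exact absurd rfl hne
  exact pv_main_unchanged d0 rest rules hok (fun hex => by simpa using hcon hex) hnd
theorem Binning_changed : Claim_changed_Binning := by unfold Claim_changed_Binning; decide
theorem Binning_tight : Claim_exact_Binning := by
  intro data rules hdom hpre hd
  obtain ⟨hne, hok, hcon⟩ := hpre
  obtain ⟨hcnt2, row0, hrow0, hshort⟩ := hd
  rcases data with _ | ⟨d0, rest⟩
  · exact absurd rfl hne
  have hcon' : (∃ r ∈ rules, pvConstr r = true) →
      ∀ row ∈ rest, 3 < row.length ∧ (PySem.Int.ofStr? (row.getD 3 "")).isSome = true :=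
    fun hex => by simpa using hcon hex
  have hrow0' : row0 ∈ rest := by simpa using hrow0
  have hallf : ∀ r ∈ rules, pvConstr r = false := by
    intro r hr
    by_contra hc
    have hc' : pvConstr r = true := by revert hc; cases pvConstr r <;> simp
    have := (hcon' ⟨r, hr, hc'⟩ row0 hrow0').1
    omega
  have hcnt : 2 ≤ rules.countP pvValid := by rw [pvCount_eq]; exact hcnt2
  have hanyf : rules.any pvConstr = false :=
    List.any_eq_false.mpr (fun r hr => by simp [hallf r hr])
  have hnones : ∀ e ∈ pvCompiled rules, e.2.1 = none ∧ e.2.2.1 = none := by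
    intro e he
    apply pvCompiled_constr rules e he
    have := List.any_eq_false.mp ((pvCompiled_any rules).trans hanyf) e he
    simpa using this
  have hallmtc : ∀ (v : Option Int), ∀ e ∈ pvCompiled rules, pvMtc v e.2.1 e.2.2.1 = true := by
    intro v e he
    obtain ⟨hl, hh⟩ := hnones e he
    rw [hl, hh]
    rfl
  have hlen2 : 2 ≤ (pvCompiled rules).length := by
    rw [pvCompiled_length]; omega
  intro heq
  rw [pvA_char d0 rest rules hok hcon', pvB_char d0 rest rules hok hcon'] at heq
  have h1 : rest.map (pvApply (pvCompiled rules)) =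
      rest.map (fun row => pvBRow (pvCompiled rules) (pvVOf row) row) := by
    have := congrArg Prod.fst heq
    simp only at this
    injection this
  have hpt := List.map_inj_left.mp h1 row0 hrow0'
  have hA := pv_apply_len_ge (pvCompiled rules) row0 hlen2 hshort
    (hallmtc (pvVOf row0))
  have hB := pv_brow_len (pvCompiled rules) row0 (pvVOf row0)
    (by intro hnil; rw [hnil] at hlen2; simp at hlen2) hshort (hallmtc (pvVOf row0))
  rw [hpt, hB] at hA
  omega
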